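-- pv_equiv track=rewrite | github.com/bineficial/meta-interview | screening/python/new/workshops.py | solution
-- ===== SOURCE A (Python) =====
-- def solution(workshops):
--
--     year_to_workshops = {}
--     for workshop in workshops:
--         year_to_workshops[workshop[0]] = workshop[1]
--
--     max_con_workshops = 0
--     for year, num in year_to_workshops.items():
--         cur_max_workshops = num + year_to_workshops.get(year + 1, 0)
--         max_con_workshops = max(max_con_workshops, cur_max_workshops)
--
--     return max_con_workshops
-- ===== SOURCE B (Python) =====
-- def solution(workshops):
--     # same year -> count map (last writer wins), then sort by year and
--     # scan adjacent entries once instead of hashing year+1 per entry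
--     counts = {}
--     for year, num in workshops:
--         counts[year] = num
--     items = sorted(counts.items(), key=lambda p: p[0])
--     best = 0
--     i = 0
--     while i < len(items):
--         year, num = items[i]
--         nxt = items[i + 1] if i + 1 < len(items) else None
--         cand = num + (nxt[1] if nxt is not None and nxt[0] == year + 1 else 0)
--         best = max(best, cand)
--         i += 1
--     return best
-- ===== Notes on version B (the rewrite author's own statement) =====
-- stated objective: alternative
-- what changed: Replaces A's per-item hash lookup of year+1 in the dict with sorting the dict items by year once and a single adjacency scan of the sorted list.
import Mathlib
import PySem

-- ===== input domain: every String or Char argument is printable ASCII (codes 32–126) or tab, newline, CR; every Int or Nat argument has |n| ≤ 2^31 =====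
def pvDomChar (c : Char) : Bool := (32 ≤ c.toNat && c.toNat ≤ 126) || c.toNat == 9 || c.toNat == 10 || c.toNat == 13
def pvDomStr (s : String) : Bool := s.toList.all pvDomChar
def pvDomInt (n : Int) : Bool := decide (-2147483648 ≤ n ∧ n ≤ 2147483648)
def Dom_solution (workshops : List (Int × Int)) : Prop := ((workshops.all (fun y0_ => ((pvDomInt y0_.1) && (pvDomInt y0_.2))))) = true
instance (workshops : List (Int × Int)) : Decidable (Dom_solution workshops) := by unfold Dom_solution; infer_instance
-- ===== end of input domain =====

-- B replaces A's per-year hash lookup of year+1 by a sort-by-year plus one adjacency scan (alternative algorithm, same result).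

-- ===== PORT A =====
-- A: build year->count dict (last writer wins), then for each item take num + dict.get(year+1, 0), running max from 0.
def solution (workshops : List (Int × Int)) : Int :=
  let d : PySem.Dict Int Int := workshops.foldl (fun d w => d.insert w.1 w.2) PySem.Dict.empty
  d.items.foldl (fun m p => max m (p.2 + d.getD (p.1 + 1) 0)) 0

-- ===== PORT B =====
-- Source B's peek at items[i+1]: the contribution of the next sorted item when its year is year+1
def peekAdd (year : Int) (rest : List (Int × Int)) : Int :=
  match rest with
  | nxt :: _ => if nxt.1 = year + 1 then nxt.2 else 0
  | [] => 0

-- Source B's index loop over the sorted items (i, looking at i+1) as structural recursion on the list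
def scanAdj : List (Int × Int) → Int → Int
  | [], best => best
  | (year, num) :: rest, best => scanAdj rest (max best (num + peekAdd year rest))

def solution_alt (workshops : List (Int × Int)) : Int :=
  let counts : PySem.Dict Int Int := workshops.foldl (fun d w => d.insert w.1 w.2) PySem.Dict.empty
  scanAdj (PySem.List.sorted counts.items (fun p => p.1)) 0

-- ===== PRECONDITION & SPEC =====
def Spec_solution (workshops : List (Int × Int)) (out : Int) : Prop := out = solution_alt workshops
instance (workshops : List (Int × Int)) (out : Int) : Decidable (Spec_solution workshops out) := by unfold Spec_solution; infer_instance

-- ===== CLAIM (what is proved, stated in full; the proofs are below) =====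
def Claim_equal_solution : Prop := ∀ (workshops : List (Int × Int)), Dom_solution workshops → Spec_solution workshops (solution workshops)

-- ===== LEMMAS AND PROOFS =====

-- On a strictly key-increasing list of items of d, the adjacency peek computes exactly d.get(year+1, 0).
lemma scanAdj_eq_foldl (d : PySem.Dict Int Int) (hnd : d.keys.Nodup) :
    ∀ (S : List (Int × Int)) (best : Int),
      S.Pairwise (fun a b => a.1 < b.1) →
      (∀ p ∈ S, p ∈ d.items) →
      (∀ p ∈ S, (p.1 + 1) ∈ d.keys → (p.1 + 1) ∈ S.map Prod.fst) →
      scanAdj S best = S.foldl (fun m p => max m (p.2 + d.getD (p.1 + 1) 0)) best := by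
  intro S
  induction S with
  | nil => intro best _ _ _; rfl
  | cons hd rest ih =>
    intro best hpw hmem hnext
    obtain ⟨y, n⟩ := hd
    have hpk : peekAdd y rest = d.getD (y + 1) 0 := by
      match hrest : rest with
      | [] =>
        by_cases hc : d.contains (y + 1) = true
        · have := hnext (y, n) (by simp) ((PySem.Dict.contains_iff_mem_keys d _).mp hc)
          rw [List.map_cons, List.map_nil, List.mem_singleton] at this; omega
        · simp [peekAdd, PySem.Dict.getD_of_not_contains d 0 (by simpa using hc)]
      | (y2, n2) :: t =>
        by_cases h2 : y2 = y + 1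
        · subst h2
          have hm : (y + 1, n2) ∈ d.items := hmem (y + 1, n2) (by simp)
          simp [peekAdd, PySem.Dict.getD_of_mem_items d hm hnd 0]
        · have hget : d.getD (y + 1) 0 = 0 := by
            by_cases hc : d.contains (y + 1) = true
            · exfalso
              have hmemS := hnext (y, n) (by simp) ((PySem.Dict.contains_iff_mem_keys d _).mp hc)
              rw [List.map_cons, List.map_cons] at hmemS
              rcases List.mem_cons.mp hmemS with h | hmemS'
              · simp at h
              rcases List.mem_cons.mp hmemS' with h | hmemS''
              · simp at h; exact h2 h.symm
              obtain ⟨q, hq, hfst⟩ := List.mem_map.mp hmemS''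
              have hy2 : y < y2 := (List.pairwise_cons.mp hpw).1 (y2, n2) (by simp)
              have := (List.pairwise_cons.mp (List.pairwise_cons.mp hpw).2).1 q hq
              simp at this; omega
            · exact PySem.Dict.getD_of_not_contains d 0 (by simpa using hc)
          simp [peekAdd, h2, hget]
    have hrest_next : ∀ p ∈ rest, (p.1 + 1) ∈ d.keys → (p.1 + 1) ∈ rest.map Prod.fst := by
      intro p hp hk
      have := hnext p (by simp [hp]) hk
      simp at this
      rcases this with h | h
      · exfalso
        have := (List.pairwise_cons.mp hpw).1 p hp
        simp at this; omega
      · simpa using h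
    simp only [scanAdj, List.foldl_cons, hpk]
    exact ih _ (List.pairwise_cons.mp hpw).2 (fun p hp => hmem p (by simp [hp])) hrest_next

-- ===== VERDICT (by name: the statement is the Claim_ definition above) =====
theorem solution_spec : Claim_equal_solution := by
  intro workshops _
  unfold Spec_solution solution solution_alt
  set d : PySem.Dict Int Int :=
    workshops.foldl (fun d w => d.insert w.1 w.2) PySem.Dict.empty with hd
  have hnd : d.keys.Nodup := by
    rw [hd]
    exact PySem.Dict.nodup_keys_foldl_insert_key workshops (fun w => w.1) (fun d w => w.2)
      PySem.Dict.empty (by simp)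
  set S := PySem.List.sorted d.items (fun p => p.1) with hS
  have hperm : S.Perm d.items := PySem.List.sorted_perm d.items (fun p => p.1) false
  have hkeys : d.keys = d.items.map Prod.fst := by
    simp only [PySem.Dict.keys]
  have hmapnodup : (S.map Prod.fst).Nodup := by
    rw [(hperm.map Prod.fst).nodup_iff, ← hkeys]; exact hnd
  have hpw : S.Pairwise (fun a b => a.1 < b.1) := by
    have hle : S.Pairwise (fun a b => a.1 ≤ b.1) := PySem.List.sorted_pairwise d.items (fun p => p.1)
    have hne : S.Pairwise (fun a b => a.1 ≠ b.1) := (List.pairwise_map.mp hmapnodup)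
    exact (hle.and hne).imp (fun h => lt_of_le_of_ne h.1 h.2)
  have hscan := scanAdj_eq_foldl d hnd S 0 hpw
    (fun p hp => hperm.mem_iff.mp hp)
    (fun p _ hk => by
      rw [hkeys] at hk
      exact ((hperm.map Prod.fst).mem_iff).mpr hk)
  have hfold :
      S.foldl (fun m p => max m (p.2 + d.getD (p.1 + 1) 0)) 0 =
      d.items.foldl (fun m p => max m (p.2 + d.getD (p.1 + 1) 0)) 0 :=
    List.Perm.foldl_eq (rcomm := ⟨fun b a1 a2 => by omega⟩) hperm 0
  rw [hscan, hfold]
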